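-- pv_equiv track=rewrite | github.com/Tesserjo/advent_of_code_2021 | day1/main.py | count_increased
-- ===== SOURCE A (Python) =====
-- def count_increased(list):
--     """Docstring: gets list with integers and counts how many are bigger then
--     predecesser."""
--     x = 0 # Checks if it's the first entry.
--     counter = 0 # Counts how many entrys are bigger than predecessor.
--     predecessor = 0
--     for i in list:
--         if x == 0:
--             predecessor = i
--             x = 1
--         else:
--             if predecessor < i:
--                 counter += 1
--             predecessor = i
--     return counter
-- ===== SOURCE B (Python) =====
-- def count_increased(list):
--     """Divide and conquer: increases in list[lo:hi] = increases in each half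
--     plus the one possible increase across the midpoint boundary."""
--     def go(lo, hi):
--         if hi - lo < 2:
--             return 0
--         mid = (lo + hi) // 2
--         return go(lo, mid) + go(mid, hi) + (1 if list[mid - 1] < list[mid] else 0)
--     return go(0, len(list))
-- ===== Notes on version B (the rewrite author's own statement) =====
-- stated objective: alternative
-- what changed: Replaces the single left-to-right pass with a first-entry flag and predecessor variable by an index-based divide-and-conquer: increases in a half-open range are the increases in each half plus the one possible increase across the midpoint.
import Mathlib
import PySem

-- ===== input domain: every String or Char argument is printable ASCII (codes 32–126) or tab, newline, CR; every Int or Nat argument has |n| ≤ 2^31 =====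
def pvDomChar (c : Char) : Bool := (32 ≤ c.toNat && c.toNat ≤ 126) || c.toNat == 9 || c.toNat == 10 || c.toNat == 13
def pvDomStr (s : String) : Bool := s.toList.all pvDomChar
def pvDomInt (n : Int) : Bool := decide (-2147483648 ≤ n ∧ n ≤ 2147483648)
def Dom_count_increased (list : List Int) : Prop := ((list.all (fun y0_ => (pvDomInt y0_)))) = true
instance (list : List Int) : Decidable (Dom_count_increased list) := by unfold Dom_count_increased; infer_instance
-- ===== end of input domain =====

-- B replaces A's single pass with first-entry flag and predecessor variable by an
-- index-based divide-and-conquer over half-open ranges (alternative decomposition).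

-- ===== PORT A =====
-- state = (x, counter, predecessor), exactly A's three variables
def count_increased (list : List Int) : Int :=
  (list.foldl (fun (s : Int × Int × Int) i =>
      if s.1 == 0 then (1, s.2.1, i)
      else if s.2.2 < i then (1, s.2.1 + 1, i)
      else (1, s.2.1, i)) (0, 0, 0)).2.1

-- ===== PORT B =====
-- Source B's recursive helper go(lo, hi); mid = (lo+hi)//2 is inlined; list[mid-1],
-- list[mid] are always in range (lo+2 ≤ hi ≤ len), so getD is exact there.
def ciGo (l : List Int) (lo hi : Nat) : Int :=
  if hi - lo < 2 then 0
  else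
    ciGo l lo ((lo + hi) / 2) + ciGo l ((lo + hi) / 2) hi +
      (if l.getD ((lo + hi) / 2 - 1) 0 < l.getD ((lo + hi) / 2) 0 then 1 else 0)
termination_by hi - lo
decreasing_by all_goals omega

def count_increased_alt (list : List Int) : Int := ciGo list 0 list.length

-- ===== PRECONDITION & SPEC =====
def Spec_count_increased (list : List Int) (out : Int) : Prop := out = count_increased_alt list
instance (list : List Int) (out : Int) : Decidable (Spec_count_increased list out) := by unfold Spec_count_increased; infer_instance

-- ===== CLAIM (what is proved, stated in full; the proofs are below) =====
def Claim_equal_count_increased : Prop := ∀ (list : List Int), Dom_count_increased list → Spec_count_increased list (count_increased list)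

-- ===== LEMMAS AND PROOFS =====

-- common spec: the increase indicator at boundary j (between positions j and j+1)
def ciF (l : List Int) (j : Nat) : Int := if l.getD j 0 < l.getD (j+1) 0 then 1 else 0

theorem ciF_cons_succ (a : Int) (l : List Int) (j : Nat) : ciF (a :: l) (j + 1) = ciF l j := by
  simp [ciF]

theorem ciSum_shift (a : Int) (l : List Int) (k : Nat) :
    ((List.range' 1 k).map (ciF (a :: l))).sum = ((List.range' 0 k).map (ciF l)).sum := by
  rw [show List.range' 1 k = (List.range' 0 k).map (1 + ·) from (List.map_add_range' (a := 1) (s := 0) (n := k) (step := 1)).symm,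
    List.map_map]
  congr 1
  apply List.map_congr_left
  intro j _
  simp only [Function.comp]
  rw [Nat.add_comm 1 j, ciF_cons_succ]

-- A's loop, after the first element has been consumed, is a fold over adjacent pairs
theorem ci_loop (l : List Int) (pred c : Int) :
    (l.foldl (fun (s : Int × Int × Int) i =>
      if s.1 == 0 then (1, s.2.1, i)
      else if s.2.2 < i then (1, s.2.1 + 1, i)
      else (1, s.2.1, i)) (1, c, pred)).2.1
    = ((pred :: l).zip l).foldl (fun acc p => if p.1 < p.2 then acc + 1 else acc) c := by
  induction l generalizing pred c with
  | nil => simp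
  | cons a t ih =>
    simp only [List.foldl, List.zip_cons_cons]
    by_cases h : pred < a
    · simpa [h] using ih a (c + 1)
    · simpa [h] using ih a c

-- the adjacent-pair fold equals the boundary-indicator sum
theorem zip_sum (l : List Int) (c : Int) :
    ((l.zip l.tail).foldl (fun acc p => if p.1 < p.2 then acc + 1 else acc) c)
    = c + ((List.range' 0 (l.length - 1)).map (ciF l)).sum := by
  induction l generalizing c with
  | nil => simp
  | cons a t ih =>
    cases t with
    | nil => simp
    | cons b t' =>
      simp only [List.tail_cons, List.zip_cons_cons, List.foldl, List.length_cons]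
      have ih' := ih (if a < b then c + 1 else c)
      simp only [List.tail_cons] at ih'
      rw [ih']
      have hr : List.range' 0 ((t'.length + 1 + 1) - 1) = 0 :: List.range' 1 (t'.length) := by
        rw [show (t'.length + 1 + 1) - 1 = t'.length + 1 from rfl, List.range'_succ]
      rw [hr]
      simp only [List.map_cons, List.sum_cons, List.length_cons,
        Nat.add_sub_cancel]
      rw [ciSum_shift a (b :: t') t'.length]
      have hf : ciF (a :: b :: t') 0 = if a < b then 1 else 0 := by simp [ciF]
      rw [hf]
      by_cases h : a < b
      · simp only [h, if_pos]
        ring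
      · simp only [h, if_neg, not_false_iff]
        ring

theorem range'_split (lo mid hi : Nat) (h1 : lo < mid) (h2 : mid < hi) :
    List.range' lo (hi - 1 - lo)
      = List.range' lo (mid - 1 - lo) ++ (mid - 1) :: List.range' mid (hi - 1 - mid) := by
  have e1 : hi - 1 - lo = (mid - 1 - lo) + ((hi - 1 - mid) + 1) := by omega
  rw [e1, ← List.range'_append]
  have e2 : lo + 1 * (mid - 1 - lo) = mid - 1 := by omega
  rw [e2, List.range'_succ, show mid - 1 + 1 = mid by omega]

-- the divide-and-conquer helper computes the boundary-indicator sum over [lo, hi)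
theorem ciGo_eq (l : List Int) (lo hi : Nat) :
    ciGo l lo hi = ((List.range' lo (hi - 1 - lo)).map (ciF l)).sum := by
  fun_induction ciGo l lo hi with
  | case1 lo hi h =>
    have e : hi - 1 - lo = 0 := by omega
    simp [e]
  | case2 lo hi h ih1 ih2 =>
    have h1 : lo < (lo + hi) / 2 := by omega
    have h2 : (lo + hi) / 2 < hi := by omega
    rw [ih1, ih2, range'_split lo ((lo + hi) / 2) hi h1 h2]
    have hm : (lo + hi) / 2 - 1 + 1 = (lo + hi) / 2 := by omega
    simp only [List.map_append, List.map_cons, List.sum_append, List.sum_cons, ciF, hm]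
    ring

-- ===== VERDICT (by name: the statement is the Claim_ definition above) =====
theorem count_increased_spec : Claim_equal_count_increased := by
  intro list _
  unfold Spec_count_increased count_increased count_increased_alt
  rw [ciGo_eq]
  cases list with
  | nil => simp
  | cons a t =>
    simp only [List.foldl]
    have h0 : (if (((0:Int) == 0) = true) then ((1:Int), (0:Int), a)
        else if (0:Int) < a then ((1:Int), (0:Int) + 1, a) else ((1:Int), (0:Int), a))
        = ((1:Int), (0:Int), a) := by norm_num
    rw [h0, ci_loop t a 0]
    simpa using zip_sum (a :: t) 0
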